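-- pv_equiv track=rewrite | github.com/etherlabsio/ai-engine | services/group_segments/extra_preprocess.py | get_filtered_pos
-- ===== SOURCE A (Python) =====
-- def get_filtered_pos(filtered, pos_list=['NN', 'JJ']):
--     filtered_list_temp = []
--     filtered_list = []
--     flag = False
--     flag_JJ = False
--     for word, pos in filtered:
--         if pos == 'NN' or pos == 'JJ':
--             flag=True
--             if pos == 'JJ':
--                 flag_JJ = True
--             else:
--                 flag_JJ = False
--             filtered_list_temp.append((word, pos))
--             continue
--         if flag:
--             if 'NN' in list(map(lambda x: x[1], filtered_list_temp)):
--                 if not flag_JJ: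
--                     filtered_list.append(list(map(lambda x:x[0], filtered_list_temp)))
--                 else:
--                     filtered_list.append(list(map(lambda x:x[0], filtered_list_temp))[:-1])
--                     flag_JJ = False
--             filtered_list_temp = []
--             flag=False
--     return filtered_list
-- ===== SOURCE B (Python) =====
-- def get_filtered_pos(filtered, pos_list=['NN', 'JJ']):
--     # Staged-pass approach: first index all separator positions (tokens whose
--     # pos is neither 'NN' nor 'JJ'); then, for each separator, slice out the
--     # segment since the previous separator and emit it if it contains an 'NN',
--     # dropping the last word when the segment ends in 'JJ'.  Tokens after the
--     # last separator are never emitted (they lack a terminating separator).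
--     cuts = [i for i, (_, pos) in enumerate(filtered) if pos != 'NN' and pos != 'JJ']
--     result = []
--     prev = -1
--     for t in cuts:
--         seg = filtered[prev + 1:t]
--         prev = t
--         if any(pos == 'NN' for _, pos in seg):
--             words = [w for w, _ in seg]
--             result.append(words[:-1] if seg[-1][1] == 'JJ' else words)
--     return result
-- ===== Notes on version B (the rewrite author's own statement) =====
-- stated objective: alternative
-- what changed: Replaces A's single-pass state machine (flag/flag_JJ/temp buffer) by two staged passes: first collect the indices of all separator tokens (pos not NN/JJ), then slice the list between consecutive separators and emit each NN-containing segment, trimming the last word when the segment ends in JJ.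
import Mathlib
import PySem

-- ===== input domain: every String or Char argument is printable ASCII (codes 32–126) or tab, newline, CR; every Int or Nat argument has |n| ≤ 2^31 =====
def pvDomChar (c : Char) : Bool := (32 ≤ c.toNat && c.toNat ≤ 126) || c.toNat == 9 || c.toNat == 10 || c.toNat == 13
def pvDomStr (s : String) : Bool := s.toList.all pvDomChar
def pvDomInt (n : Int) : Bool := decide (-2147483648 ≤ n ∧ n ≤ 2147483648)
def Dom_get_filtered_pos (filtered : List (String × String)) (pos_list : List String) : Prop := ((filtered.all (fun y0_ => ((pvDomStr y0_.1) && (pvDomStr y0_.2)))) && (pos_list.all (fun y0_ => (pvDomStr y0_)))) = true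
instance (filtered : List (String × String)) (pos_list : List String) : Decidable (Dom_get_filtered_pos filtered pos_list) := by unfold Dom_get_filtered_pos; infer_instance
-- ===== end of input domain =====

-- B replaces A's stateful flag/temp-buffer loop by two staged passes: index the separator
-- positions, then slice the list between consecutive separators; objective: alternative.
-- pos_list is unused, exactly as in A.


-- ===== PORT A =====
-- state = (filtered_list_temp, flag, flag_JJ, filtered_list); [:-1] ported via PySem.List.slice
def pvAStep : (List (String × String) × Bool × Bool × List (List String)) →
    (String × String) → List (String × String) × Bool × Bool × List (List String)
  | (temp, flag, flagJJ, out), (word, pos) =>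
  if pos == "NN" || pos == "JJ" then
    (temp ++ [(word, pos)], true, pos == "JJ", out)
  else if flag then
    if (temp.map (fun x => x.2)).contains "NN" then
      if !flagJJ then
        ([], false, flagJJ, out ++ [temp.map (fun x => x.1)])
      else
        ([], false, false, out ++ [PySem.List.slice (temp.map (fun x => x.1)) none (some (-1))])
    else ([], false, flagJJ, out)
  else (temp, flag, flagJJ, out)

def get_filtered_pos (filtered : List (String × String)) (pos_list : List String) : List (List String) :=
  (filtered.foldl pvAStep ([], false, false, [])).2.2.2

-- ===== PORT B =====
-- pass 1 of Source B: cuts = [i for i, (_, pos) in enumerate(filtered) if pos != 'NN' and pos != 'JJ']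
def pvSep (wp : String × String) : Bool := !(wp.2 == "NN") && !(wp.2 == "JJ")

def pvCutsFrom (l : List (String × String)) (s : Int) : List Int :=
  (PySem.List.enumerate l s).filterMap (fun iwp => if pvSep iwp.2 then some iwp.1 else none)

-- pass 2 of Source B: one loop iteration; state = (prev, result).  seg[-1] is only read when
-- seg contains an 'NN' (hence is nonempty), so the .getD default is never the value used.
def pvBStep (fil : List (String × String)) (st : Int × List (List String)) (t : Int) :
    Int × List (List String) :=
  let seg := PySem.List.slice fil (some (st.1 + 1)) (some t)
  if seg.any (fun wp => wp.2 == "NN") then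
    (t, st.2 ++ [if ((PySem.List.pyGet? seg (-1)).getD ("", "")).2 == "JJ"
                 then PySem.List.slice (seg.map (fun wp => wp.1)) none (some (-1))
                 else seg.map (fun wp => wp.1)])
  else (t, st.2)

def get_filtered_pos_alt (filtered : List (String × String)) (pos_list : List String) : List (List String) :=
  ((pvCutsFrom filtered 0).foldl (pvBStep filtered) (-1, [])).2

-- ===== PRECONDITION & SPEC =====
def Spec_get_filtered_pos (filtered : List (String × String)) (pos_list : List String) (out : List (List String)) : Prop := out = get_filtered_pos_alt filtered pos_list
instance (filtered : List (String × String)) (pos_list : List String) (out : List (List String)) : Decidable (Spec_get_filtered_pos filtered pos_list out) := by unfold Spec_get_filtered_pos; infer_instance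

-- ===== CLAIM (what is proved, stated in full; the proofs are below) =====
def Claim_equal_get_filtered_pos : Prop := ∀ (filtered : List (String × String)) (pos_list : List String), Dom_get_filtered_pos filtered pos_list → Spec_get_filtered_pos filtered pos_list (get_filtered_pos filtered pos_list)

-- ===== LEMMAS AND PROOFS =====

def pvKey (wp : String × String) : Bool := wp.2 == "NN" || wp.2 == "JJ"

-- common reference function: S p l = output of the rest of the stream given pending run p
def pvEmit (p : List (String × String)) : List (List String) :=
  if (p.map (fun x => x.2)).contains "NN" then
    if (p.getLastD ("", "")).2 == "JJ" then [(p.map (fun x => x.1)).dropLast]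
    else [p.map (fun x => x.1)]
  else []

def pvS (p : List (String × String)) : List (String × String) → List (List String)
  | [] => []
  | x :: l => if pvKey x then pvS (p ++ [x]) l else pvEmit p ++ pvS [] l

theorem pvS_nil_cons (p : List (String × String)) (x : String × String) (l : List (String × String)) :
    pvS p (x :: l) = if pvKey x then pvS (p ++ [x]) l else pvEmit p ++ pvS [] l := rfl

-- ---- A-side: the fold computes out ++ pvS p l ----
theorem pvA_fold (l : List (String × String)) :
    ∀ (p : List (String × String)) (flag flagJJ : Bool) (out : List (List String)),
      (flag = true ↔ p ≠ []) →
      (p ≠ [] → flagJJ = ((p.getLastD ("", "")).2 == "JJ")) →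
      (l.foldl pvAStep (p, flag, flagJJ, out)).2.2.2 = out ++ pvS p l := by
  induction l with
  | nil => intro p flag flagJJ out _ _; simp [pvS]
  | cons x l ih =>
    intro p flag flagJJ out hfl hJJ
    obtain ⟨w, q⟩ := x
    rw [List.foldl_cons, pvS_nil_cons]
    by_cases hk : pvKey (w, q)
    · rw [if_pos hk]
      have hq : (q == "NN" || q == "JJ") = true := hk
      have hstep : pvAStep (p, flag, flagJJ, out) (w, q)
          = (p ++ [(w, q)], true, q == "JJ", out) := by
        simp only [pvAStep, hq, if_pos]
      rw [hstep]
      exact ih (p ++ [(w, q)]) true (q == "JJ") out (by simp) (fun _ => by simp)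
    · rw [if_neg hk]
      have hq : (q == "NN" || q == "JJ") = false := by
        simp [pvKey] at hk; simp [hk.1, hk.2]
      rcases eq_or_ne p [] with hp | hp
      · subst hp
        have hflag : flag = false := by
          cases flag with
          | false => rfl
          | true => exact absurd (hfl.mp rfl) (by simp)
        subst hflag
        have hstep : pvAStep (([] : List (String × String)), false, flagJJ, out) (w, q)
            = ([], false, flagJJ, out) := by
          simp only [pvAStep, hq]
          simp
        rw [hstep]
        rw [ih [] false flagJJ out (by simp) (by simp)]
        simp [pvEmit]
      · have hflag : flag = true := hfl.mpr hp
        subst hflag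
        have hJJ' := hJJ hp
        have hunf : pvAStep (p, true, flagJJ, out) (w, q)
            = if ((p.map (fun x => x.2)).contains "NN") = true then
                if (!flagJJ) = true then ([], false, flagJJ, out ++ [p.map (fun x => x.1)])
                else ([], false, false, out ++ [PySem.List.slice (p.map (fun x => x.1)) none (some (-1))])
              else ([], false, flagJJ, out) := by
          simp only [pvAStep]
          rw [hq]
          simp
        by_cases hNN : ((p.map (fun x => x.2)).contains "NN") = true
        · have hEmit : pvEmit p = (if flagJJ then [(p.map (fun x => x.1)).dropLast]
              else [p.map (fun x => x.1)]) := by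
            unfold pvEmit
            rw [if_pos hNN, hJJ']
          cases hfj : flagJJ with
          | false =>
            rw [hfj] at hunf hEmit
            rw [hunf, if_pos hNN, if_pos (by simp)]
            rw [ih [] false false (out ++ [p.map (fun x => x.1)]) (by simp) (by simp)]
            rw [hEmit]
            simp
          | true =>
            rw [hfj] at hunf hEmit
            rw [hunf, if_pos hNN, if_neg (by simp)]
            rw [ih [] false false _ (by simp) (by simp)]
            rw [hEmit, PySem.List.slice_to_neg_one]
            simp
        · have hEmit : pvEmit p = [] := by
            unfold pvEmit
            rw [if_neg hNN]
          rw [hunf, if_neg hNN]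
          rw [ih [] false flagJJ out (by simp) (by simp)]
          rw [hEmit]
          simp

-- ---- B-side bridging lemmas ----
theorem pvSep_eq_not_key (wp : String × String) : pvSep wp = !pvKey wp := by
  simp [pvSep, pvKey]

theorem pvCutsFrom_nil (s : Int) : pvCutsFrom [] s = [] := by
  simp [pvCutsFrom, PySem.List.enumerate_nil]

theorem pvCutsFrom_cons (x : String × String) (xs : List (String × String)) (s : Int) :
    pvCutsFrom (x :: xs) s
      = if pvSep x then s :: pvCutsFrom xs (s + 1) else pvCutsFrom xs (s + 1) := by
  simp only [pvCutsFrom, PySem.List.enumerate_cons, List.filterMap_cons]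
  by_cases h : pvSep x
  · simp [h]
  · simp [h]

theorem pvCutsFrom_of_key (run : List (String × String)) :
    ∀ (s : Int), (∀ y ∈ run, pvKey y = true) → pvCutsFrom run s = [] := by
  induction run with
  | nil => intro s _; exact pvCutsFrom_nil s
  | cons y t ih =>
    intro s h
    have hy : pvSep y = false := by
      rw [pvSep_eq_not_key, h y (by simp)]; rfl
    rw [pvCutsFrom_cons, if_neg (by simp [hy])]
    exact ih (s + 1) (fun z hz => h z (by simp [hz]))

theorem pvCutsFrom_append (xs ys : List (String × String)) (s : Int) :
    pvCutsFrom (xs ++ ys) s = pvCutsFrom xs s ++ pvCutsFrom ys (s + xs.length) := by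
  simp [pvCutsFrom, PySem.List.enumerate_append, List.filterMap_append]

-- pending run of key-true tokens is absorbed
theorem pvS_true_absorb (t : List (String × String)) :
    ∀ (p : List (String × String)) (l : List (String × String)),
      (∀ y ∈ t, pvKey y = true) → pvS p (t ++ l) = pvS (p ++ t) l := by
  induction t with
  | nil => intro p l _; simp
  | cons y t ih =>
    intro p l h
    have hy : pvKey y = true := h y (by simp)
    rw [List.cons_append, pvS_nil_cons, if_pos hy]
    rw [ih (p ++ [y]) l (fun z hz => h z (by simp [hz]))]
    simp

theorem pv_contains_snd (l : List (String × String)) :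
    (l.map (fun x => x.2)).contains "NN" = l.any (fun wp => wp.2 == "NN") := by
  induction l with
  | nil => rfl
  | cons a l ih =>
    simp only [List.map_cons, List.contains_cons, List.any_cons, ih]
    rw [BEq.comm]

-- B's step on a terminated run emits exactly pvEmit run
theorem pvBStep_emit (fil pre run tail : List (String × String)) (out : List (List String))
    (hfil : fil = pre ++ run ++ tail) :
    pvBStep fil (((pre.length : Int) - 1), out) ((pre.length : Int) + (run.length : Int))
      = (((pre.length : Int) + (run.length : Int)), out ++ pvEmit run) := by
  have hseg : PySem.List.slice fil (some ((pre.length : Int) - 1 + 1))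
      (some ((pre.length : Int) + (run.length : Int))) = run := by
    have h1 : ((pre.length : Int) - 1 + 1) = ((pre.length : Nat) : Int) := by omega
    have h2 : ((pre.length : Int) + (run.length : Int)) = (((pre.length + run.length : Nat)) : Int) := by
      push_cast; ring
    rw [h1, h2, PySem.List.slice_natCast, hfil]
    rw [List.append_assoc, List.drop_left]
    have : pre.length + run.length - pre.length = run.length := by omega
    rw [this, List.take_left]
  unfold pvBStep
  simp only [hseg]
  rw [← pv_contains_snd]
  by_cases hNN : ((run.map (fun x => x.2)).contains "NN") = true
  · rw [if_pos hNN]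
    have hne : run ≠ [] := by
      intro h; rw [h] at hNN; simp at hNN
    have hlast : ((PySem.List.pyGet? run (-1)).getD ("", "")) = run.getLastD ("", "") := by
      rw [PySem.List.pyGet?_neg_one, List.getLastD_eq_getLast?]
    rw [hlast]
    unfold pvEmit
    rw [if_pos hNN, PySem.List.slice_to_neg_one]
    by_cases hJJ : ((run.getLastD ("", "")).2 == "JJ") = true
    · rw [if_pos hJJ, if_pos hJJ]
    · rw [if_neg hJJ, if_neg hJJ]
  · rw [if_neg hNN]
    unfold pvEmit
    rw [if_neg hNN]
    simp

-- main B-side lemma: the fold over the remaining cuts computes out ++ pvS [] l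
theorem pvB_fold (n : ℕ) : ∀ (fil pre l : List (String × String)) (out : List (List String)),
    fil = pre ++ l → l.length ≤ n →
    ((pvCutsFrom l (pre.length : Int)).foldl (pvBStep fil) (((pre.length : Int) - 1), out)).2
      = out ++ pvS [] l := by
  induction n with
  | zero =>
    intro fil pre l out hfil hl
    have : l = [] := by cases l <;> simp_all
    subst this
    rw [pvCutsFrom_nil]
    simp [pvS]
  | succ n ih =>
    intro fil pre l out hfil hl
    set run := l.takeWhile (fun y => !pvSep y) with hrun
    set rest0 := l.dropWhile (fun y => !pvSep y) with hrest0
    have hsplit : l = run ++ rest0 := by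
      simp [hrun, hrest0, List.takeWhile_append_dropWhile]
    have hrunkey : ∀ y ∈ run, pvKey y = true := by
      intro y hy
      have := List.mem_takeWhile_imp hy
      simp only [Bool.not_eq_true'] at this
      rw [pvSep_eq_not_key] at this
      simpa using this
    cases hre : rest0 with
    | nil =>
      -- l has no separators: no cuts, and pvS absorbs everything into the never-flushed run
      have hl' : l = run := by rw [hsplit, hre]; simp
      rw [hl', pvCutsFrom_of_key run _ hrunkey]
      rw [show run = run ++ ([] : List (String × String)) by simp,
        pvS_true_absorb run [] [] hrunkey]
      simp [pvS]
    | cons z rest =>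
      have hzsep : pvSep z = true := by
        have := List.head?_dropWhile_not (fun y => !pvSep y) l
        rw [← hrest0, hre] at this
        simp at this
        exact this
      have hl' : l = run ++ z :: rest := by rw [hsplit, hre]
      have hcuts : pvCutsFrom l (pre.length : Int)
          = ((pre.length : Int) + (run.length : Int))
            :: pvCutsFrom rest ((pre.length : Int) + (run.length : Int) + 1) := by
        rw [hl', pvCutsFrom_append, pvCutsFrom_of_key run _ hrunkey, pvCutsFrom_cons,
          if_pos hzsep]
        simp
      have hfil' : fil = (pre ++ run ++ [z]) ++ rest := by
        rw [hfil, hl']; simp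
      have hstep := pvBStep_emit fil pre run (z :: rest) out (by rw [hfil, hl']; simp)
      have hlen : ((pre ++ run ++ [z]).length : Int) = (pre.length : Int) + (run.length : Int) + 1 := by
        simp; ring
      have hrestlen : rest.length ≤ n := by
        have : l.length = run.length + rest.length + 1 := by rw [hl']; simp; omega
        omega
      rw [hcuts, List.foldl_cons, hstep]
      have hprev : ((pre.length : Int) + (run.length : Int))
          = (((pre ++ run ++ [z]).length : Int) - 1) := by rw [hlen]; ring
      rw [hprev,
        show (((pre ++ run ++ [z]).length : Int) - 1 + 1) = ((pre ++ run ++ [z]).length : Int) from by ring]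
      rw [ih fil (pre ++ run ++ [z]) rest (out ++ pvEmit run) hfil' hrestlen]
      rw [hl', pvS_true_absorb run [] (z :: rest) hrunkey, List.nil_append,
        pvS_nil_cons, if_neg (by rw [pvSep_eq_not_key] at hzsep; simp at hzsep; simp [hzsep])]
      simp

-- ===== VERDICT (by name: the statement is the Claim_ definition above) =====
theorem get_filtered_pos_spec : Claim_equal_get_filtered_pos := by
  intro filtered pos_list _
  unfold Spec_get_filtered_pos get_filtered_pos get_filtered_pos_alt
  rw [pvA_fold filtered [] false false [] (by simp) (by simp)]
  have := pvB_fold filtered.length filtered [] filtered [] (by simp) le_rfl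
  simp only [List.length_nil, Nat.cast_zero, zero_sub] at this
  rw [this]
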